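-- pv_equiv track=rewrite | github.com/Cr0ckyy/Cr0ckyy-Introduction-to-Discrete-Mathematics-for-Computer-Science-Specialization | 4_Number_Theory_and_Cryptography/Week_1/Four_Numbers.py | find_divisible_pair
-- ===== SOURCE A (Python) =====
-- def find_divisible_pair(numbers):
--
--     # Dictionary to store numbers by their remainder when divided by 3
--     remainders = {0: [], 1: [], 2: []}
--
--     # Assign each number to a list based on its remainder when divided by 3
--     for number in numbers:
--         remainder = number % 3
--         remainders[remainder].append(number)
--
--         # Check if we have found at least two numbers with the same remainder
--         if len(remainders[remainder]) >= 2: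
--             return True, remainders[remainder][0], remainders[remainder][1]
--
--     return False, None, None
-- ===== SOURCE B (Python) =====
-- def find_divisible_pair(numbers):
--     # Nested scan over the already-seen prefix instead of remainder buckets:
--     # the first earlier number with the same remainder mod 3 is the answer.
--     seen = []
--     for x in numbers:
--         for y in seen:
--             if y % 3 == x % 3:
--                 return True, y, x
--         seen.append(x)
--     return False, None, None
-- ===== Notes on version B (the rewrite author's own statement) =====
-- stated objective: simpler
-- what changed: Replaced the remainder-bucket dictionary with a plain nested scan of the seen prefix for an earlier number with the same remainder mod 3.
import Mathlib
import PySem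

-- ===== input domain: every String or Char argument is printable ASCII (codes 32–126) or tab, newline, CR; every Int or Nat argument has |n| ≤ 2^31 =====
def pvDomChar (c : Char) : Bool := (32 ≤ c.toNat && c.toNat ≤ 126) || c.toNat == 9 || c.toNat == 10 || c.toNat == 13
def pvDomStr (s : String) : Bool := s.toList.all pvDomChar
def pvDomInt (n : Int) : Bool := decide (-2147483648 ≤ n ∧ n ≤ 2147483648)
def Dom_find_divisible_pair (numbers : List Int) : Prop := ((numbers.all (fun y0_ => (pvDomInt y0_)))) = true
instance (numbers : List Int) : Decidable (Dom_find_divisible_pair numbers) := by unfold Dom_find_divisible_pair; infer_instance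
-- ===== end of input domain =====

-- B replaces A's remainder-bucket dictionary with a plain nested scan of the seen prefix (simpler; same results).

-- ===== PORT A =====
-- the literal initial dict {0: [], 1: [], 2: []}
def pvInitRemainders : PySem.Dict Int (List Int) := PySem.Dict.ofList [(0, []), (1, []), (2, [])]

-- A's for-loop: dict state, early return at the first bucket of size ≥ 2.
-- remainders[remainder][0]/[1] are Python indexings, ported via pyGet? (here always in range, so some _).
def pvLoopA (d : PySem.Dict Int (List Int)) : List Int → Bool × Option Int × Option Int
  | [] => (false, none, none)
  | n :: rest =>
    let r := PySem.Int.mod n 3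
    let d' := d.modify r [] (fun l => l ++ [n])
    let lst := d'.getD r []
    if lst.length ≥ 2 then (true, PySem.List.pyGet? lst 0, PySem.List.pyGet? lst 1)
    else pvLoopA d' rest

def find_divisible_pair (numbers : List Int) : Bool × Option Int × Option Int :=
  pvLoopA pvInitRemainders numbers

-- ===== PORT B =====
-- B's inner loop: first y in seen with y % 3 == x % 3
def pvFirstSameMod (x : Int) : List Int → Option Int
  | [] => none
  | y :: rest => if PySem.Int.mod y 3 == PySem.Int.mod x 3 then some y else pvFirstSameMod x rest

-- B's outer loop over numbers, carrying the seen prefix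
def pvLoopB (seen : List Int) : List Int → Bool × Option Int × Option Int
  | [] => (false, none, none)
  | x :: rest =>
    match pvFirstSameMod x seen with
    | some y => (true, some y, some x)
    | none => pvLoopB (seen ++ [x]) rest

def find_divisible_pair_alt (numbers : List Int) : Bool × Option Int × Option Int :=
  pvLoopB [] numbers

-- ===== PRECONDITION & SPEC =====
def Spec_find_divisible_pair (numbers : List Int) (out : Bool × Option Int × Option Int) : Prop := out = find_divisible_pair_alt numbers
instance (numbers : List Int) (out : Bool × Option Int × Option Int) : Decidable (Spec_find_divisible_pair numbers out) := by unfold Spec_find_divisible_pair; infer_instance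

-- ===== CLAIM (what is proved, stated in full; the proofs are below) =====
def Claim_equal_find_divisible_pair : Prop := ∀ (numbers : List Int), Dom_find_divisible_pair numbers → Spec_find_divisible_pair numbers (find_divisible_pair numbers)

-- ===== LEMMAS AND PROOFS =====

lemma pvMod3 (a : Int) : PySem.Int.mod a 3 = a % 3 := PySem.Int.mod_eq_emod_of_pos (by norm_num)

lemma pvInit_getD (r : Int) : pvInitRemainders.getD r [] = [] := by
  simp [pvInitRemainders, PySem.Dict.getD_eq_get?_getD, PySem.Dict.ofList, PySem.Dict.update,
        PySem.Dict.insert, PySem.Dict.empty, PySem.Dict.get?_mk_cons]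
  split_ifs <;> rfl

lemma pvFirstSameMod_eq_head? (x : Int) (seen : List Int) :
    pvFirstSameMod x seen = (seen.filter (fun y => y % 3 == x % 3)).head? := by
  induction seen with
  | nil => rfl
  | cons y rest ih =>
    simp only [pvFirstSameMod, List.filter_cons, pvMod3, ih]
    split_ifs with h <;> simp_all

-- invariant: the dict's bucket at r is exactly the seen numbers with remainder r, each of size ≤ 1
lemma pvLoops_agree : ∀ (rest seen : List Int) (d : PySem.Dict Int (List Int)),
    (∀ r : Int, d.getD r [] = seen.filter (fun y => y % 3 == r)) →
    (∀ r : Int, (seen.filter (fun y => y % 3 == r)).length ≤ 1) →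
    pvLoopA d rest = pvLoopB seen rest := by
  intro rest
  induction rest with
  | nil => intro seen d _ _; rfl
  | cons n rest ih =>
    intro seen d hinv hlen
    have hbucket : (d.modify (PySem.Int.mod n 3) [] (fun l => l ++ [n])).getD (PySem.Int.mod n 3) []
        = seen.filter (fun y => y % 3 == n % 3) ++ [n] := by
      rw [PySem.Dict.getD_modify_self, hinv, pvMod3]
    cases hfm : pvFirstSameMod n seen with
    | some y =>
      have hh : (seen.filter (fun y => y % 3 == n % 3)).head? = some y := by
        rw [← pvFirstSameMod_eq_head?, hfm]
      have hfy : seen.filter (fun y => y % 3 == n % 3) = [y] := by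
        rcases hf : seen.filter (fun y => y % 3 == n % 3) with _ | ⟨z, tl⟩
        · rw [hf] at hh; simp at hh
        · rw [hf] at hh
          have := hlen (n % 3)
          rw [hf] at this
          cases tl with
          | nil => simp at hh; simp [hh]
          | cons _ _ => simp at this
      simp only [pvLoopA, pvLoopB, hfm, hbucket, hfy]
      norm_num
    | none =>
      have hfe : seen.filter (fun y => y % 3 == n % 3) = [] := by
        have hh : (seen.filter (fun y => y % 3 == n % 3)).head? = none := by
          rw [← pvFirstSameMod_eq_head?, hfm]
        exact List.head?_eq_none_iff.mp hh
      simp only [pvLoopA, pvLoopB, hfm, hbucket, hfe]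
      norm_num
      apply ih
      · intro r
        simp only [PySem.Dict.getD_modify, hinv, List.filter_append]
        by_cases hr : r = n % 3
        · rw [if_pos hr, hr, hfe]
          simp
        · rw [if_neg hr]
          have hz : (n % 3 == r) = false := beq_eq_false_iff_ne.mpr (fun h => hr h.symm)
          simp [hz]
      · intro r
        rw [List.filter_append]
        by_cases hr : r = n % 3
        · rw [hr, hfe]
          simp
        · have hz : (n % 3 == r) = false := beq_eq_false_iff_ne.mpr (fun h => hr h.symm)
          have h1 : [n].filter (fun y => y % 3 == r) = [] := by
            simp [hz]
          rw [h1, List.append_nil]; exact hlen r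

-- ===== VERDICT (by name: the statement is the Claim_ definition above) =====
theorem find_divisible_pair_spec : Claim_equal_find_divisible_pair := by
  intro numbers _
  unfold Spec_find_divisible_pair find_divisible_pair find_divisible_pair_alt
  apply pvLoops_agree
  · intro r; simp [pvInit_getD]
  · intro r; simp
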